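-- pv_equiv track=rewrite | github.com/rvsiyad/LeetSync | 65-valid-number/valid-number.py | isValidPostExponent
-- ===== SOURCE A (Python) =====
-- def isValidPostExponent(postExponent):
--     if not postExponent:
--         return False
--
--     numberSeen = False
--
--     i = 0
--
--     if postExponent[i] in ['+', '-']:
--         i += 1
--
--     while i < len(postExponent):
--         if postExponent[i].isdigit():
--             numberSeen = True
--         elif not postExponent[i].isdigit():
--             return False
--
--         i += 1
--
--     return numberSeen
-- ===== SOURCE B (Python) =====
-- def isValidPostExponent(postExponent):
--     n = len(postExponent)
--     if n == 0:
--         return False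
--     offset = 1 if postExponent[0] in ('+', '-') else 0
--     digits = sum(1 for ch in postExponent if ch.isdigit())
--     return digits == n - offset and digits > 0
-- ===== Notes on version B (the rewrite author's own statement) =====
-- stated objective: alternative
-- what changed: Replaces A's positional scan with an early-exit and a numberSeen flag by a counting formulation: count the digit characters in the whole string once and compare the count arithmetically against the length minus the optional sign.
import Mathlib
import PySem

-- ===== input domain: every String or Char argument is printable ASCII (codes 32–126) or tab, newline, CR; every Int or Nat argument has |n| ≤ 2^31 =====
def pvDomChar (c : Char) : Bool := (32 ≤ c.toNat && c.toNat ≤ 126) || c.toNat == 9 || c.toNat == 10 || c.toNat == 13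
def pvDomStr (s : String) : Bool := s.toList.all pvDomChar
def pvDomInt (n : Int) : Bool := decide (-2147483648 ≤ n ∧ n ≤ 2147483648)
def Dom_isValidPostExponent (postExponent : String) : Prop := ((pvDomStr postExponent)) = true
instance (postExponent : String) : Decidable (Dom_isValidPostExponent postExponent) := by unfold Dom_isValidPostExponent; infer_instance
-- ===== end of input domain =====

-- B replaces A's positional scan with early exit and a numberSeen flag by counting the
-- digit characters once and comparing the count against length minus optional sign
-- (objective: alternative decomposition, same cost).

-- ===== PORT A =====
-- the while-loop over indices i..len-1, carrying the numberSeen flag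
def isValidPostExponentLoop : List Char → Bool → Bool
  | [], numberSeen => numberSeen
  | c :: rest, _numberSeen =>
      if PySem.Chars.isdigit c then isValidPostExponentLoop rest true
      else false

def isValidPostExponent (postExponent : String) : Bool :=
  match postExponent.toList with
  | [] => false                                   -- if not postExponent: return False
  | c :: rest =>                                  -- s[0] in ['+','-'] → start loop at i = 1
      if c = '+' ∨ c = '-' then isValidPostExponentLoop rest false
      else isValidPostExponentLoop (c :: rest) false

-- ===== PORT B =====
def isValidPostExponent_alt (postExponent : String) : Bool :=
  match postExponent.toList with
  | [] => false                                        -- if n == 0: return False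
  | c :: rest =>
      let n := (c :: rest).length                      -- n = len(postExponent)
      let offset : Nat := if c = '+' ∨ c = '-' then 1 else 0
      let digits := (c :: rest).countP (fun ch => PySem.Chars.isdigit ch)  -- sum(1 for ch … if ch.isdigit())
      decide (digits = n - offset ∧ 0 < digits)

-- ===== PRECONDITION & SPEC =====
def Spec_isValidPostExponent (postExponent : String) (out : Bool) : Prop := out = isValidPostExponent_alt postExponent
instance (postExponent : String) (out : Bool) : Decidable (Spec_isValidPostExponent postExponent out) := by unfold Spec_isValidPostExponent; infer_instance

-- ===== CLAIM (what is proved, stated in full; the proofs are below) =====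
def Claim_equal_isValidPostExponent : Prop := ∀ (postExponent : String), Dom_isValidPostExponent postExponent → Spec_isValidPostExponent postExponent (isValidPostExponent postExponent)

-- ===== LEMMAS AND PROOFS =====
theorem loop_eq_all (l : List Char) (seen : Bool) :
    isValidPostExponentLoop l seen = ((seen || !l.isEmpty) && l.all PySem.Chars.isdigit) := by
  induction l generalizing seen with
  | nil => simp [isValidPostExponentLoop]
  | cons c rest ih =>
      simp only [isValidPostExponentLoop, ih, List.all_cons, List.isEmpty_cons]
      cases PySem.Chars.isdigit c <;> simp

theorem count_full (l : List Char) :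
    decide (l.countP (fun ch => PySem.Chars.isdigit ch) = l.length ∧
            0 < l.countP (fun ch => PySem.Chars.isdigit ch))
      = ((!l.isEmpty) && l.all PySem.Chars.isdigit) := by
  by_cases h : l.all PySem.Chars.isdigit = true
  · have hc : l.countP (fun ch => PySem.Chars.isdigit ch) = l.length :=
      List.countP_eq_length.mpr (fun a ha => by simpa using List.all_eq_true.mp h a ha)
    cases l with
    | nil => simp
    | cons c rest => simp [hc, h]
  · have hne : l.countP (fun ch => PySem.Chars.isdigit ch) ≠ l.length := fun he =>
      h (List.all_eq_true.mpr (fun a ha => by simpa using List.countP_eq_length.mp he a ha))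
    simp [h, hne]

-- ===== VERDICT (by name: the statement is the Claim_ definition above) =====
theorem isValidPostExponent_spec : Claim_equal_isValidPostExponent := by
  intro s _
  unfold Spec_isValidPostExponent isValidPostExponent isValidPostExponent_alt
  cases h : s.toList with
  | nil => rfl
  | cons c rest =>
      by_cases hc : c = '+' ∨ c = '-'
      · -- sign: A scans rest; B counts over c::rest, where c is not a digit
        have hcd : PySem.Chars.isdigit c = false := by
          rcases hc with rfl | rfl <;> decide
        have h1 : (c :: rest).countP (fun ch => PySem.Chars.isdigit ch)
            = rest.countP (fun ch => PySem.Chars.isdigit ch) := by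
          simp [hcd]
        simp only [hc, if_true, loop_eq_all, h1, List.length_cons, Nat.add_sub_cancel]
        rw [count_full rest]
        simp
      · simp only [hc, if_false, loop_eq_all, Nat.sub_zero]
        rw [count_full (c :: rest)]
        simp
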